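-- pv_equiv track=rewrite | github.com/Grecu-Narcis/University | Semester 1/Fundamentals of programming/Labs/L01/p3.py | get_moths_passed
-- ===== SOURCE A (Python) =====
-- def is_leap_year(year):
--     """
--     function to check if a given year is leap
--     :param year: natural number >= 1
--     :return: boolean
--     True if [year] is leap, False otherwise
--     """
--
--     if year % 400 == 0:
--         return True
--
--     if year % 4 == 0 and year % 100 != 0:
--         return True
--
--     return False
--
-- def get_moths_passed(year, month):
--     """
--     return the number of days of months that passed completely in [year]
--     :param year: natural number
--     :param month: natural number
--     :return: natural number representing sum of days of months completely passed in [year]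
--     """
--
--     result = 0
--     month_day = [0, 31, 28, 31, 30, 31, 30, 31, 31, 30, 31, 30, 31]
--
--     # for each whole month that passed in the current [year] we add the corresponding number of days
--     for i in range(1, month):
--         if i == 2:
--             if is_leap_year(year):
--                 result += 29
--             else:
--                 result += 28
--         else:
--             result += month_day[i]
--
--     return result
-- ===== SOURCE B (Python) =====
-- def is_leap_year(year):
--     if year % 400 == 0:
--         return True
--     if year % 4 == 0 and year % 100 != 0:
--         return True
--     return False
--
-- CUM = [0, 31, 59, 90, 120, 151, 181, 212, 243, 273, 304, 334, 365]
--
-- def get_moths_passed(year, month):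
--     if month < 1:
--         return 0
--     days = CUM[month - 1]
--     if month > 2 and is_leap_year(year):
--         days += 1
--     return days
-- ===== Notes on version B (the rewrite author's own statement) =====
-- stated objective: faster
-- what changed: Replaces the per-month accumulation loop with an O(1) lookup in a precomputed 13-entry cumulative prefix table plus a single leap-day adjustment for month > 2.
import Mathlib
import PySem

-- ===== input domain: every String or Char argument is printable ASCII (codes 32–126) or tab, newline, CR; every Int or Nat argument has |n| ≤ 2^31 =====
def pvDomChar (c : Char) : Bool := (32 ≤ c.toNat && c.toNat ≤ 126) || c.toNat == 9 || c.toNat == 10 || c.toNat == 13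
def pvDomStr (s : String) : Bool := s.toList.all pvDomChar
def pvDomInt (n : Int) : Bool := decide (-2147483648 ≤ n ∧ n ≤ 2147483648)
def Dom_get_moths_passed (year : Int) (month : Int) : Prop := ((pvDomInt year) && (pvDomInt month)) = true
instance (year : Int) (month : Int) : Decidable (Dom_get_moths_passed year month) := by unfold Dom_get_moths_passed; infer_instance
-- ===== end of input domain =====

-- B replaces A's per-month accumulation loop with a single lookup in a precomputed cumulative prefix table plus a leap-day adjustment.


-- ===== PORT A =====
def is_leap_year (year : Int) : Bool :=
  if PySem.Int.mod year 400 = 0 then true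
  else if PySem.Int.mod year 4 = 0 ∧ PySem.Int.mod year 100 ≠ 0 then true
  else false

def get_moths_passed (year : Int) (month : Int) : Int :=
  let month_day : List Int := [0, 31, 28, 31, 30, 31, 30, 31, 31, 30, 31, 30, 31]
  (PySem.List.pyRange 1 month 1).foldl (fun result i =>
    if i = 2 then
      if is_leap_year year then result + 29 else result + 28
    else
      result + (PySem.List.pyGet? month_day i).getD 0) 0

-- ===== PORT B =====
def pvCUM : List Int := [0, 31, 59, 90, 120, 151, 181, 212, 243, 273, 304, 334, 365]

def get_moths_passed_alt (year : Int) (month : Int) : Int :=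
  if month < 1 then 0
  else
    let days := (PySem.List.pyGet? pvCUM (month - 1)).getD 0
    if month > 2 ∧ is_leap_year year then days + 1 else days

-- ===== PRECONDITION & SPEC =====
-- Pre_ excludes exactly month ≥ 14, where both Pythons raise IndexError (the loop reads month_day[13]).
def Pre_get_moths_passed (year : Int) (month : Int) : Prop := month ≤ 13
instance (year : Int) (month : Int) : Decidable (Pre_get_moths_passed year month) := by unfold Pre_get_moths_passed; infer_instance
def pvWitness_get_moths_passed : Int × Int := (2024, 5)

def Spec_get_moths_passed (year : Int) (month : Int) (out : Int) : Prop := out = get_moths_passed_alt year month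
instance (year : Int) (month : Int) (out : Int) : Decidable (Spec_get_moths_passed year month out) := by unfold Spec_get_moths_passed; infer_instance

-- ===== CLAIM (what is proved, stated in full; the proofs are below) =====
def Claim_equal_get_moths_passed : Prop := ∀ (year : Int) (month : Int), Dom_get_moths_passed year month → Pre_get_moths_passed year month → Spec_get_moths_passed year month (get_moths_passed year month)

-- ===== LEMMAS AND PROOFS =====

-- ===== VERDICT (by name: the statement is the Claim_ definition above) =====
theorem get_moths_passed_spec : Claim_equal_get_moths_passed := by
  intro year month _ hpre
  unfold Pre_get_moths_passed at hpre
  unfold Spec_get_moths_passed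
  by_cases h1 : month < 1
  · have h : PySem.List.pyRange 1 month 1 = [] := PySem.List.pyRange_one_eq_nil (by omega)
    simp [get_moths_passed, get_moths_passed_alt, h, h1]
  · replace h1 : 1 ≤ month := by omega
    interval_cases month <;>
      simp [get_moths_passed, get_moths_passed_alt, PySem.List.pyRange_one, List.range_succ,
        pvCUM, PySem.List.pyGet?, PySem.List.pyIdx?] <;>
      by_cases hl : is_leap_year year = true <;> simp [hl]
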